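-- pv_equiv track=rewrite | github.com/Kimdoodle/Approx | py_approx_test/cal_depth.py | check_coeff_type
-- ===== SOURCE A (Python) =====
-- def check_coeff_type(coeff: list):
--     degrees = [i for i, c in enumerate(coeff) if c != 0]
--     if not degrees:
--         return "etc"
--
--     max_deg = max(degrees)
--
--     # 1. 홀수차 함수
--     if all(d % 2 == 1 for d in degrees):
--         return "odd"
--
--     # 2. 짝수차 함수
--     if all(d % 2 == 0 for d in degrees):
--         return "even"
--
--     # 3. Cleanse 함수
--     if max_deg % 2 == 1 and all(d in {max_deg, max_deg - 1} for d in degrees):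
--         return "cl"
--
--     # 4. 기타
--     return "etc"
-- ===== SOURCE B (Python) =====
-- def check_coeff_type(coeff: list):
--     has_odd = has_even = False
--     min_deg = max_deg = -1
--     for i, c in enumerate(coeff):
--         if c != 0:
--             if i % 2 != 0:
--                 has_odd = True
--             else:
--                 has_even = True
--             if min_deg < 0:
--                 min_deg = i
--             max_deg = i
--     if max_deg < 0:
--         return "etc"
--     if not has_even:
--         return "odd"
--     if not has_odd:
--         return "even"
--     if max_deg % 2 == 1 and min_deg >= max_deg - 1:
--         return "cl"
--     return "etc"
-- ===== Notes on version B (the rewrite author's own statement) =====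
-- stated objective: alternative
-- what changed: Replaces the built degrees list, the three all()-scans and max() by one pass over enumerate(coeff) that tracks has_odd/has_even/min_deg/max_deg of the nonzero coefficients; the set-membership all() becomes the numeric bound min_deg >= max_deg - 1.
import Mathlib
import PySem

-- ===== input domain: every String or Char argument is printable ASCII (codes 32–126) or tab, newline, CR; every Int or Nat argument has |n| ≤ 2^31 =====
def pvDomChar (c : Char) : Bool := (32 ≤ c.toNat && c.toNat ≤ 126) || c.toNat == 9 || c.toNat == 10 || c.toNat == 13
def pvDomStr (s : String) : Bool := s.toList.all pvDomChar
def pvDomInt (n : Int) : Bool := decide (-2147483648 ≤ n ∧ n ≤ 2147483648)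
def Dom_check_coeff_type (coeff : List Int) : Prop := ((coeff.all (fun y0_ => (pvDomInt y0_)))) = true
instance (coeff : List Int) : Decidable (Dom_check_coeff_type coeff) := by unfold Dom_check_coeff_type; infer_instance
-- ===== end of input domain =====

-- B replaces A's degrees list, three all()-scans and max() by one pass tracking has_odd/has_even/min/max (alternative decomposition, same O(n)).


-- ===== PORT A =====
def check_coeff_type (coeff : List Int) : String :=
  let degrees : List Int :=
    ((PySem.List.enumerate coeff 0).filter (fun p => p.2 != 0)).map Prod.fst
  if degrees.isEmpty then "etc"
  else
    let max_deg : Int := (PySem.List.max? degrees (fun d => d)).getD 0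
    if degrees.all (fun d => PySem.Int.mod d 2 == 1) then "odd"
    else if degrees.all (fun d => PySem.Int.mod d 2 == 0) then "even"
    else if (PySem.Int.mod max_deg 2 == 1) &&
            degrees.all (fun d => d == max_deg || d == max_deg - 1) then "cl"
    else "etc"

-- ===== PORT B =====
def check_coeff_type_alt (coeff : List Int) : String :=
  let st : Bool × Bool × Int × Int :=
    (PySem.List.enumerate coeff 0).foldl
      (fun (s : Bool × Bool × Int × Int) p =>
        if p.2 != 0 then
          ((if PySem.Int.mod p.1 2 != 0 then true else s.1),
           (if PySem.Int.mod p.1 2 != 0 then s.2.1 else true),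
           (if s.2.2.1 < 0 then p.1 else s.2.2.1),
           p.1)
        else s)
      (false, false, -1, -1)
  if st.2.2.2 < 0 then "etc"
  else if st.2.1 = false then "odd"
  else if st.1 = false then "even"
  else if (PySem.Int.mod st.2.2.2 2 == 1) && (st.2.2.1 ≥ st.2.2.2 - 1) then "cl"
  else "etc"

-- ===== PRECONDITION & SPEC =====
def Spec_check_coeff_type (coeff : List Int) (out : String) : Prop := out = check_coeff_type_alt coeff
instance (coeff : List Int) (out : String) : Decidable (Spec_check_coeff_type coeff out) := by unfold Spec_check_coeff_type; infer_instance

-- ===== CLAIM (what is proved, stated in full; the proofs are below) =====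
def Claim_equal_check_coeff_type : Prop := ∀ (coeff : List Int), Dom_check_coeff_type coeff → Spec_check_coeff_type coeff (check_coeff_type coeff)

-- ===== LEMMAS AND PROOFS =====

-- proof-level name for B's loop body applied to a kept index
def pvStep (s : Bool × Bool × Int × Int) (d : Int) : Bool × Bool × Int × Int :=
  ((if PySem.Int.mod d 2 != 0 then true else s.1),
   (if PySem.Int.mod d 2 != 0 then s.2.1 else true),
   (if s.2.2.1 < 0 then d else s.2.2.1),
   d)

-- B's fold over enumerate equals a fold of pvStep over A's degrees list
lemma pvFold_bridge (l : List (Int × Int)) (st : Bool × Bool × Int × Int) :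
    l.foldl
      (fun (s : Bool × Bool × Int × Int) p =>
        if p.2 != 0 then
          ((if PySem.Int.mod p.1 2 != 0 then true else s.1),
           (if PySem.Int.mod p.1 2 != 0 then s.2.1 else true),
           (if s.2.2.1 < 0 then p.1 else s.2.2.1),
           p.1)
        else s) st
    = ((l.filter (fun p => p.2 != 0)).map Prod.fst).foldl pvStep st := by
  rw [List.foldl_map, List.foldl_filter]
  rfl

lemma pvFold_go (t : List Int) (ho he : Bool) (mn mx : Int) (hmn : 0 ≤ mn) :
    t.foldl pvStep (ho, he, mn, mx) =
      (ho || t.any (fun d => PySem.Int.mod d 2 != 0),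
       he || t.any (fun d => !(PySem.Int.mod d 2 != 0)),
       mn, t.getLastD mx) := by
  induction t generalizing ho he mx with
  | nil => simp
  | cons d t ih =>
    have hnot : ¬ mn < 0 := by omega
    have hstep : pvStep (ho, he, mn, mx) d =
        ((ho || (PySem.Int.mod d 2 != 0)), (he || !(PySem.Int.mod d 2 != 0)), mn, d) := by
      simp only [pvStep, if_neg hnot]
      cases h : (PySem.Int.mod d 2 != 0) <;> cases ho <;> cases he <;> simp [h]
    rw [List.foldl_cons, hstep, ih, List.any_cons, List.any_cons, List.getLastD_cons]
    simp [Bool.or_assoc]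

lemma pvFold_start (d : Int) (t : List Int) (hd : 0 ≤ d) :
    (d :: t).foldl pvStep (false, false, -1, -1) =
      ((d :: t).any (fun x => PySem.Int.mod x 2 != 0),
       (d :: t).any (fun x => !(PySem.Int.mod x 2 != 0)),
       d, t.getLastD d) := by
  have : (-1 : Int) < 0 := by omega
  simp only [List.foldl_cons, pvStep, if_pos this, List.any_cons]
  rw [pvFold_go _ _ _ _ _ hd]
  cases h : (PySem.Int.mod d 2 != 0) <;> simp [h]

lemma pvLast_mem (d : Int) (t : List Int) : t.getLastD d ∈ d :: t := by
  induction t generalizing d with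
  | nil => simp
  | cons e t ih =>
    simp only [List.getLastD_cons]
    have h := ih e
    simp only [List.mem_cons] at h ⊢
    tauto

lemma pvLast_ge (d : Int) (t : List Int) (h : (d :: t).Pairwise (· < ·)) :
    ∀ x ∈ d :: t, x ≤ t.getLastD d := by
  induction t generalizing d with
  | nil => intro x hx; simp at hx ⊢; omega
  | cons e t ih =>
    intro x hx
    have hde : d < e := (List.pairwise_cons.mp h).1 e (by simp)
    have ht : (e :: t).Pairwise (· < ·) := (List.pairwise_cons.mp h).2
    simp only [List.getLastD_cons]
    rcases List.mem_cons.mp hx with rfl | hx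
    · have := ih e ht e (by simp)
      omega
    · exact ih e ht x hx

lemma pvHead_le (d : Int) (t : List Int) (h : (d :: t).Pairwise (· < ·)) :
    ∀ x ∈ d :: t, d ≤ x := by
  intro x hx
  rcases List.mem_cons.mp hx with rfl | hx
  · omega
  · have := (List.pairwise_cons.mp h).1 x hx
    omega

lemma pvMax_eq_last (d : Int) (t : List Int) (h : (d :: t).Pairwise (· < ·)) :
    PySem.List.max? (d :: t) (fun x => x) = some (t.getLastD d) := by
  cases hm : PySem.List.max? (d :: t) (fun x => x) with
  | none => simp [PySem.List.max?_eq_none_iff] at hm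
  | some m =>
    have hmem := PySem.List.max?_mem hm
    have hmax := PySem.List.max?_isMax hm
    have h1 : t.getLastD d ≤ m := hmax _ (pvLast_mem d t)
    have h2 : m ≤ t.getLastD d := pvLast_ge d t h m hmem
    have : m = t.getLastD d := le_antisymm h2 h1
    rw [this]

-- ===== VERDICT (by name: the statement is the Claim_ definition above) =====
theorem check_coeff_type_spec : Claim_equal_check_coeff_type := by
  intro coeff _
  unfold Spec_check_coeff_type check_coeff_type check_coeff_type_alt
  simp only []
  rw [pvFold_bridge]
  set ds : List Int :=
    ((PySem.List.enumerate coeff 0).filter (fun p => p.2 != 0)).map Prod.fst with hds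
  have hpos : ∀ x ∈ ds, 0 ≤ x := by
    intro x hx
    rw [hds] at hx
    simp only [List.mem_map, List.mem_filter] at hx
    obtain ⟨p, ⟨hp, _⟩, hpx⟩ := hx
    rw [PySem.List.mem_enumerate_iff] at hp
    obtain ⟨k, hk, rfl⟩ := hp
    simp at hpx
    omega
  have hpair : ds.Pairwise (· < ·) := by
    rw [hds]
    rw [List.pairwise_map]
    exact (PySem.List.pairwise_lt_enumerate coeff 0).filter _
  clear hds
  clear_value ds
  cases ds with
  | nil => simp
  | cons d t =>
    have hd0 : 0 ≤ d := hpos d (by simp)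
    rw [pvFold_start d t hd0, pvMax_eq_last d t hpair]
    set L := t.getLastD d with hL
    have hL0 : 0 ≤ L := hpos L (pvLast_mem d t)
    have hLnn : ¬ L < 0 := by omega
    -- branch-condition equivalences
    have hfun1 : (fun x => !(PySem.Int.mod x 2 == 1)) = (fun x => !(PySem.Int.mod x 2 != 0)) := by
      funext x
      have h : x % 2 = 0 ∨ x % 2 = 1 := by omega
      rcases h with h | h <;> simp [h]
    have hfun2 : (fun x => !(PySem.Int.mod x 2 == 0)) = (fun x => (PySem.Int.mod x 2 != 0)) := by
      funext x
      have h : x % 2 = 0 ∨ x % 2 = 1 := by omega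
      rcases h with h | h <;> simp [h]
    have hodd : ((d :: t).all (fun x => PySem.Int.mod x 2 == 1))
        = !((d :: t).any (fun x => !(PySem.Int.mod x 2 != 0))) := by
      simp only [List.all_eq_not_any_not, hfun1]
    have heven : ((d :: t).all (fun x => PySem.Int.mod x 2 == 0))
        = !((d :: t).any (fun x => PySem.Int.mod x 2 != 0)) := by
      simp only [List.all_eq_not_any_not, hfun2]
    have hcl : ((d :: t).all (fun x => x == L || x == L - 1)) = decide (d ≥ L - 1) := by
      by_cases hc : d ≥ L - 1
      · simp only [hc, decide_true]
        rw [List.all_eq_true]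
        intro x hx
        have h1 := pvHead_le d t hpair x hx
        have h2 := pvLast_ge d t hpair x hx
        rw [← hL] at h2
        have : x = L ∨ x = L - 1 := by omega
        rcases this with h | h <;> simp [h]
      · simp only [hc, decide_false]
        rw [List.all_eq_false]
        refine ⟨d, by simp, ?_⟩
        have h2 := pvLast_ge d t hpair d (by simp)
        rw [← hL] at h2
        simp only [Bool.or_eq_true, beq_iff_eq, not_or]
        omega
    simp only [List.isEmpty_cons, Bool.false_eq_true, if_false, hLnn, if_false,
      Option.getD_some, hodd, heven, hcl]
    cases hA : (d :: t).any (fun x => PySem.Int.mod x 2 != 0) <;>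
      cases hB : (d :: t).any (fun x => !(PySem.Int.mod x 2 != 0)) <;>
        by_cases hg : d ≥ L - 1 <;> simp [hg]
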